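-- pv_equiv track=rewrite | github.com/geekdojo-io/programming-challenges | 02192019-min-max-3.py | solve
-- ===== SOURCE A (Python) =====
-- from collections import Counter
--
-- def solve(ar):
--     min_, max_ = min(ar), max(ar)
--     ft = Counter() # Frequency table
--     for num in ar:
--         ft[num] += 1
--     for i in range(min_ + 1, max_ + 1):
--         if ft[i] == 0:
--             return False
--     return True
-- ===== SOURCE B (Python) =====
-- def solve(ar):
--     s = sorted(ar)
--     for a, b in zip(s, s[1:]):
--         if b - a > 1:
--             return False
--     return True
-- ===== Notes on version B (the rewrite author's own statement) =====
-- stated objective: alternative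
-- what changed: Replaces the Counter frequency table plus a scan over every integer from min+1 to max with a single sort followed by an adjacent-gap pass (zip of the sorted list with its tail); duplicates give gap 0 and are harmless.
import Mathlib
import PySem

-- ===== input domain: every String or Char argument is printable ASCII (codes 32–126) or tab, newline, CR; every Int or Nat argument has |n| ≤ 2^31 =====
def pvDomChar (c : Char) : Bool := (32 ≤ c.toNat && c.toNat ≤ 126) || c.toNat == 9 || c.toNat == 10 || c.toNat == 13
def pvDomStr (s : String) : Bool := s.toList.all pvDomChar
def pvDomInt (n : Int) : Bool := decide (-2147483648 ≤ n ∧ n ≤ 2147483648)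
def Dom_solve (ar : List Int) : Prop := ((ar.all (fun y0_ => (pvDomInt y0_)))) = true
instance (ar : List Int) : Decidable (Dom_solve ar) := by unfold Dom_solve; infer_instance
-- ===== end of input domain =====

-- B replaces A's Counter frequency table + scan over every integer in [min+1, max] by a sort followed by an adjacent-gap pass; equal on all nonempty lists (A raises ValueError on []).


-- ===== PORT A =====
-- A's 'for i in range(min_+1, max_+1): if ft[i] == 0: return False' — Python's range is a lazy
-- iterator and the loop returns early, so it is transliterated as this recursion over i.
def solveLoop (ft : PySem.Dict Int Int) (i stop : Int) : Bool :=
  if h : i < stop then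
    if PySem.Dict.getD ft i 0 == 0 then false
    else solveLoop ft (i + 1) stop
  else true
termination_by (stop - i).toNat
decreasing_by omega

def solve (ar : List Int) : Bool :=
  match PySem.List.min? ar (fun x => x), PySem.List.max? ar (fun x => x) with
  | some min_, some max_ =>
    let ft := ar.foldl (fun d num => PySem.Dict.modify d num 0 (· + 1)) (PySem.Dict.empty : PySem.Dict Int Int)
    solveLoop ft (min_ + 1) (max_ + 1)
  | _, _ => false   -- unreachable under Pre_solve: min()/max() raise ValueError on []

-- ===== PORT B =====
def solve_alt (ar : List Int) : Bool :=
  let s := PySem.List.sorted ar (fun x => x) false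
  (s.zip (PySem.List.slice s (some 1) none)).all (fun p => !(decide (p.2 - p.1 > 1)))

-- ===== PRECONDITION & SPEC =====
-- Pre_ excludes only the empty list, on which Python A raises ValueError (min() of an empty sequence).
def Pre_solve (ar : List Int) : Prop := ar ≠ []
instance (ar : List Int) : Decidable (Pre_solve ar) := by unfold Pre_solve; infer_instance
def pvWitness_solve : List Int := ([3, 1, 2])

def Spec_solve (ar : List Int) (out : Bool) : Prop := out = solve_alt ar
instance (ar : List Int) (out : Bool) : Decidable (Spec_solve ar out) := by unfold Spec_solve; infer_instance

-- ===== CLAIM (what is proved, stated in full; the proofs are below) =====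
def Claim_equal_solve : Prop := ∀ (ar : List Int), Dom_solve ar → Pre_solve ar → Spec_solve ar (solve ar)

-- ===== LEMMAS AND PROOFS =====

-- B's loop body, named for the proofs: "no adjacent gap in s exceeds 1".
def gapOK (s : List Int) : Bool := (s.zip s.tail).all (fun p => !(decide (p.2 - p.1 > 1)))

theorem gapOK_cons_cons (a b : Int) (t : List Int) :
    gapOK (a :: b :: t) = ((!(decide (b - a > 1))) && gapOK (b :: t)) := by
  simp [gapOK]

-- If no adjacent gap exceeds 1 then every integer between the head and the last element occurs.
theorem mem_of_gapOK : ∀ (t : List Int) (a : Int),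
    gapOK (a :: t) = true →
    ∀ i : Int, a ≤ i → i ≤ (a :: t).getLast (by simp) → i ∈ a :: t
  | [], a, _, i, h1, h2 => by
    simp at h2; simp; omega
  | b :: t, a, hg, i, h1, h2 => by
    rw [gapOK_cons_cons] at hg
    simp only [Bool.and_eq_true, Bool.not_eq_true', decide_eq_false_iff_not, not_lt] at hg
    rw [List.getLast_cons (by simp)] at h2
    by_cases hia : i = a
    · simp [hia]
    · have hbi : b ≤ i := by omega
      exact List.mem_cons_of_mem _ (mem_of_gapOK t b hg.2 i hbi h2)

-- Conversely, on a ≤-sorted list that contains every integer between its head and its last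
-- element, no adjacent gap exceeds 1.
theorem gapOK_of_mem : ∀ (t : List Int) (a : Int), (a :: t).Pairwise (· ≤ ·) →
    (∀ i : Int, a ≤ i → i ≤ (a :: t).getLast (by simp) → i ∈ a :: t) →
    gapOK (a :: t) = true
  | [], _, _, _ => by simp [gapOK]
  | b :: t, a, hp, hmem => by
    rw [gapOK_cons_cons]
    have hab : a ≤ b := (List.pairwise_cons.1 hp).1 _ (by simp)
    have hbt : ∀ x ∈ b :: t, b ≤ x := by
      intro x hx
      rcases List.mem_cons.1 hx with rfl | hx
      · exact le_refl _
      · exact (List.pairwise_cons.1 (List.pairwise_cons.1 hp).2).1 _ hx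
    have hlast : b ≤ (b :: t).getLast (by simp) := hbt _ (List.getLast_mem _)
    have hgap : b - a ≤ 1 := by
      by_contra hgt
      have h1 : a + 1 ≤ (a :: b :: t).getLast (by simp) := by
        rw [List.getLast_cons (show b :: t ≠ [] by simp)]; omega
      have := hmem (a + 1) (by omega) h1
      rcases List.mem_cons.1 this with h | h
      · omega
      · have := hbt _ h; omega
    rw [Bool.and_eq_true]
    refine ⟨by simp; omega, ?_⟩
    apply gapOK_of_mem t b (List.pairwise_cons.1 hp).2
    intro i hbi hil
    have : i ∈ a :: b :: t := by
      apply hmem i (by omega)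
      rw [List.getLast_cons (show b :: t ≠ [] by simp)]; exact hil
    rcases List.mem_cons.1 this with rfl | h
    · exact List.mem_cons.2 (Or.inl (le_antisymm hab hbi))
    · exact h

theorem le_getLast_of_pairwise : ∀ (s : List Int) (h : s ≠ []), s.Pairwise (· ≤ ·) →
    ∀ x ∈ s, x ≤ s.getLast h
  | [a], _, _, x, hx => by simp_all
  | a :: b :: t, _, hp, x, hx => by
    rw [List.getLast_cons (by simp)]
    cases hx with
    | head => exact (List.pairwise_cons.1 hp).1 _ (List.getLast_mem _)
    | tail _ hx => exact le_getLast_of_pairwise (b :: t) (by simp) (List.pairwise_cons.1 hp).2 x hx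

-- The early-exit loop computes the same Bool as 'all' over the whole range.
theorem solveLoop_eq (ft : PySem.Dict Int Int) (a b : Int) :
    solveLoop ft a b = (PySem.List.pyRange a b 1).all (fun i => !(PySem.Dict.getD ft i 0 == 0)) := by
  generalize hn : (b - a).toNat = n
  induction n generalizing a with
  | zero =>
    rw [solveLoop, PySem.List.pyRange_one_eq_nil (by omega), dif_neg (by omega)]
    rfl
  | succ n ih =>
    have hab : a < b := by omega
    rw [solveLoop, PySem.List.pyRange_one_cons hab, dif_pos hab, List.all_cons]
    cases hz : (PySem.Dict.getD ft a 0 == 0) with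
    | true => simp
    | false => simp [ih (a + 1) (by omega)]

theorem solve_eq_solve_alt (ar : List Int) (hpre : ar ≠ []) : solve ar = solve_alt ar := by
  unfold solve solve_alt
  obtain ⟨mn, hmn⟩ : ∃ mn, PySem.List.min? ar (fun x => x) = some mn := by
    cases h : PySem.List.min? ar (fun x => x) with
    | none => exact absurd ((PySem.List.min?_eq_none_iff _ _).1 h) hpre
    | some m => exact ⟨m, rfl⟩
  obtain ⟨mx, hmx⟩ : ∃ mx, PySem.List.max? ar (fun x => x) = some mx := by
    cases h : PySem.List.max? ar (fun x => x) with
    | none => exact absurd ((PySem.List.max?_eq_none_iff _ _).1 h) hpre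
    | some m => exact ⟨m, rfl⟩
  obtain ⟨h, t, hst⟩ : ∃ h t, PySem.List.sorted ar (fun x => x) false = h :: t := by
    cases hc : PySem.List.sorted ar (fun x => x) false with
    | nil => exact absurd ((PySem.List.sorted_eq_nil_iff _ _ _).1 hc) hpre
    | cons a l => exact ⟨a, l, rfl⟩
  rw [hmn, hmx]
  simp only [hst, PySem.List.slice_from_one, List.tail_cons, solveLoop_eq]
  have hpair : (h :: t).Pairwise (· ≤ ·) := by
    simpa [hst] using PySem.List.sorted_pairwise ar (fun x => x)
  have hmem : ∀ x : Int, x ∈ h :: t ↔ x ∈ ar := fun x => by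
    rw [← hst]; exact PySem.List.mem_sorted ar (fun x => x) false x
  have hh : h = mn := by
    have h1 : ∀ y ∈ ar, h ≤ y := by
      simpa using PySem.List.key_head_sorted_le ar (fun x => x) hst
    have h2 : mn ≤ h := PySem.List.min?_isMin hmn h ((hmem h).1 List.mem_cons_self)
    exact le_antisymm (h1 mn (PySem.List.min?_mem hmn)) h2
  have hlast : (h :: t).getLast (by simp) = mx := by
    have h1 : (h :: t).getLast (by simp) ≤ mx :=
      PySem.List.max?_isMax hmx _ ((hmem _).1 (List.getLast_mem _))
    have h2 : mx ≤ (h :: t).getLast (by simp) :=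
      le_getLast_of_pairwise (h :: t) (by simp) hpair mx ((hmem mx).2 (PySem.List.max?_mem hmx))
    exact le_antisymm h1 h2
  have hcount : ∀ i : Int,
      PySem.Dict.getD (ar.foldl (fun d num => PySem.Dict.modify d num 0 (· + 1)) (PySem.Dict.empty : PySem.Dict Int Int)) i 0
        = (ar.count i : Int) := fun i => by
    rw [← PySem.Dict.counter_eq_foldl, PySem.Dict.getD_counter]
  show (PySem.List.pyRange (mn + 1) (mx + 1) 1).all
      (fun i => !(PySem.Dict.getD (ar.foldl (fun d num => PySem.Dict.modify d num 0 (· + 1)) (PySem.Dict.empty : PySem.Dict Int Int)) i 0 == 0))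
      = gapOK (h :: t)
  rw [Bool.eq_iff_iff]
  simp only [List.all_eq_true, PySem.List.mem_pyRange_one]
  constructor
  · intro hA
    apply gapOK_of_mem t h hpair
    intro i hhi hil
    rw [hlast] at hil
    rcases eq_or_lt_of_le hhi with rfl | hlt
    · exact List.mem_cons_self
    · have hA' := hA i ⟨by omega, by omega⟩
      rw [hcount] at hA'
      have hcnt : (ar.count i : Int) ≠ 0 := by simpa using hA'
      have hiar : i ∈ ar := List.count_pos_iff.1 (by omega)
      exact (hmem i).2 hiar
  · intro hB i hi
    have hmemi : i ∈ h :: t := by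
      apply mem_of_gapOK t h hB i (by omega)
      rw [hlast]; omega
    have hiar : i ∈ ar := (hmem i).1 hmemi
    have := List.count_pos_iff.2 hiar
    rw [hcount]
    simp only [Bool.not_eq_eq_eq_not, Bool.not_true, beq_eq_false_iff_ne]
    omega

-- ===== VERDICT (by name: the statement is the Claim_ definition above) =====
theorem solve_spec : Claim_equal_solve := by
  intro ar _ hpre
  exact solve_eq_solve_alt ar hpre
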